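-- pv_equiv track=rewrite | github.com/dokyeongK/Algorithm | programmers/level 1/42840.py | solution
-- ===== SOURCE A (Python) =====
-- def solution(answers):
--     # 완전탐색
--     person1 = [1, 2, 3, 4, 5]
--     person2 = [2, 1, 2, 3, 2, 4, 2, 5]
--     person3 = [3, 3, 1, 1, 2, 2, 4, 4, 5, 5]
--     correct1, correct2, correct3 = 0, 0, 0
--
--     answer = []
--
--     for idx, right_value in enumerate(answers):
--         if right_value == person1[idx % len(person1)]: correct1 += 1
--         if right_value == person2[idx % len(person2)]: correct2 += 1
--         if right_value == person3[idx % len(person3)]: correct3 += 1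
--
--     max_score = max(correct1, correct2)
--     max_score = max(max_score, correct3)
--
--     if max_score == correct1: answer.append(1)
--     if max_score == correct2: answer.append(2)
--     if max_score == correct3: answer.append(3)
--
--
--     return answer
-- ===== SOURCE B (Python) =====
-- def solution(answers):
--     # All three patterns are periodic with periods 5, 8, 10, whose lcm is 40,
--     # so whether index i matches pattern p depends only on (i % 40, answers[i]).
--     # Build a histogram over these pairs in one pass, then read each score off
--     # the 40 buckets without rescanning answers.
--     cnt = {}
--     for i, a in enumerate(answers):
--         key = (i % 40, a)
--         cnt[key] = cnt.get(key, 0) + 1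
--     patterns = [
--         [1, 2, 3, 4, 5],
--         [2, 1, 2, 3, 2, 4, 2, 5],
--         [3, 3, 1, 1, 2, 2, 4, 4, 5, 5],
--     ]
--     scores = [sum(cnt.get((r, p[r % len(p)]), 0) for r in range(40)) for p in patterns]
--     best = max(scores)
--     return [k + 1 for k, s in enumerate(scores) if s == best]
-- ===== Notes on version B (the rewrite author's own statement) =====
-- stated objective: alternative
-- what changed: B never compares answers against the patterns elementwise: it builds a histogram keyed by (index mod 40, answer) in one pass (40 = lcm of the three pattern periods), then computes each score as a 40-bucket lookup sum over that histogram, and selects winners by a comprehension over the score list; A runs one fused scan with three hard-coded counters and an if-chain of appends.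
import Mathlib
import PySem

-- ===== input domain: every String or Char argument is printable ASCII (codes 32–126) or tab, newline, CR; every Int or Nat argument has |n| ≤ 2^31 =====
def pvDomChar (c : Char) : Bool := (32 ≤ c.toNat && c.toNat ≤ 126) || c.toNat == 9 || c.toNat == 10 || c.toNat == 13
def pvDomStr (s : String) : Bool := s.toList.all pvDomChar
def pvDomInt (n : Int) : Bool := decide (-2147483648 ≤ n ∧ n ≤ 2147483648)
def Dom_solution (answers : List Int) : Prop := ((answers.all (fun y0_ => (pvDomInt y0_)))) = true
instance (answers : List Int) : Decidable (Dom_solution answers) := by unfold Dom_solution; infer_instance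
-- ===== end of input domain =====

-- B replaces A's fused three-counter comparison pass by a histogram keyed by
-- (index mod 40, answer) built in one pass (40 = lcm of the pattern periods) and
-- reads each score off the 40 buckets; winners are selected by a comprehension
-- over the score list (objective: alternative).

-- ===== PORT A =====
-- single pass over enumerate(answers) maintaining three counters; indexing p[idx % len(p)]
-- is always in range, so pyGetD is exact here
def solution (answers : List Int) : List Int :=
  let person1 : List Int := [1, 2, 3, 4, 5]
  let person2 : List Int := [2, 1, 2, 3, 2, 4, 2, 5]
  let person3 : List Int := [3, 3, 1, 1, 2, 2, 4, 4, 5, 5]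
  let c :=
    (PySem.List.enumerate answers).foldl
      (fun (c : Int × Int × Int) iv =>
        let c1 := if iv.2 = PySem.List.pyGetD person1 (PySem.Int.mod iv.1 (person1.length : Int)) 0 then c.1 + 1 else c.1
        let c2 := if iv.2 = PySem.List.pyGetD person2 (PySem.Int.mod iv.1 (person2.length : Int)) 0 then c.2.1 + 1 else c.2.1
        let c3 := if iv.2 = PySem.List.pyGetD person3 (PySem.Int.mod iv.1 (person3.length : Int)) 0 then c.2.2 + 1 else c.2.2
        (c1, c2, c3))
      (0, 0, 0)
  let maxScore := max c.1 c.2.1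
  let maxScore := max maxScore c.2.2
  let answer : List Int := []
  let answer := if maxScore = c.1 then answer ++ [1] else answer
  let answer := if maxScore = c.2.1 then answer ++ [2] else answer
  let answer := if maxScore = c.2.2 then answer ++ [3] else answer
  answer

-- ===== PORT B =====
-- cnt[key] = cnt.get(key, 0) + 1 over key = (i % 40, a); then per-pattern
-- sums of 40 histogram lookups; max(scores); comprehension over enumerate(scores)
def bHist (answers : List Int) : PySem.Dict (Int × Int) Int :=
  (PySem.List.enumerate answers).foldl
    (fun d iv =>
      let key := (PySem.Int.mod iv.1 40, iv.2)
      d.insert key (d.getD key 0 + 1))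
    PySem.Dict.empty

def bScore (cnt : PySem.Dict (Int × Int) Int) (p : List Int) : Int :=
  (PySem.List.pyRange 0 40 1).foldl
    (fun s r => s + cnt.getD (r, PySem.List.pyGetD p (PySem.Int.mod r (p.length : Int)) 0) 0) 0

def solution_alt (answers : List Int) : List Int :=
  let cnt := bHist answers
  let patterns : List (List Int) :=
    [[1, 2, 3, 4, 5], [2, 1, 2, 3, 2, 4, 2, 5], [3, 3, 1, 1, 2, 2, 4, 4, 5, 5]]
  let scores := patterns.map (bScore cnt)
  let best := (PySem.List.max? scores (fun x => x)).getD 0   -- scores has 3 elements, max? is some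
  (PySem.List.enumerate scores).foldl
    (fun (acc : List Int) is => if is.2 = best then acc ++ [is.1 + 1] else acc) []

-- ===== PRECONDITION & SPEC =====
def Spec_solution (answers : List Int) (out : List Int) : Prop := out = solution_alt answers
instance (answers : List Int) (out : List Int) : Decidable (Spec_solution answers out) := by unfold Spec_solution; infer_instance

-- ===== CLAIM (what is proved, stated in full; the proofs are below) =====
def Claim_equal_solution : Prop := ∀ (answers : List Int), Dom_solution answers → Spec_solution answers (solution answers)

-- ===== LEMMAS AND PROOFS =====

-- B's histogram lookup is a count over the key list
theorem bHist_getD (answers : List Int) (k : Int × Int) :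
    (bHist answers).getD k 0
      = (((PySem.List.enumerate answers).map
            (fun iv => (PySem.Int.mod iv.1 40, iv.2))).count k : Int) := by
  simp only [bHist]
  rw [← List.foldl_map (f := fun iv : Int × Int => (PySem.Int.mod iv.1 40, iv.2))
        (g := fun (d : PySem.Dict (Int × Int) Int) x => d.insert x (d.getD x 0 + 1)),
      PySem.Dict.getD_foldl_insert_add_one]
  simp [PySem.Dict.getD_empty]

-- a key (m, a) with 0 ≤ m < 40 is hit by exactly one r of range(40), namely r = m
theorem countP_range_pair (pk : Int → Int) (m a : Int) (hm0 : 0 ≤ m) (hm : m < 40) :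
    (PySem.List.pyRange 0 40 1).countP (fun r => (r, pk r) == (m, a))
      = if pk m = a then 1 else 0 := by
  by_cases h : pk m = a
  · have hcg : ∀ r ∈ PySem.List.pyRange 0 40 1,
        (((r, pk r) == (m, a)) = true ↔ (r == m) = true) := by
      intro r _
      by_cases hr : r = m
      · subst hr; simp [h]
      · simp [hr]
    rw [List.countP_congr hcg]
    have : (PySem.List.pyRange 0 40 1).countP (fun r => r == m)
        = (PySem.List.pyRange 0 40 1).count m := by
      simp [List.count]
    rw [this, List.count_eq_one_of_mem (PySem.List.nodup_pyRange_one 0 40)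
          ((PySem.List.mem_pyRange_one).mpr ⟨hm0, hm⟩)]
    simp [h]
  · rw [List.countP_eq_zero.mpr, if_neg h]
    intro r _ hr
    apply h
    have h' := eq_of_beq hr
    rw [Prod.mk.injEq] at h'
    rw [← h'.1]
    exact h'.2

-- summing 40 bucket counts = counting matching keys
theorem sum_counts (K : List (Int × Int)) (pk : Int → Int)
    (hK : ∀ k ∈ K, 0 ≤ k.1 ∧ k.1 < 40) :
    (PySem.List.pyRange 0 40 1).foldl
      (fun s r => s + (K.count (r, pk r) : Int)) 0
      = (K.countP (fun k => pk k.1 == k.2) : Int) := by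
  rw [PySem.List.foldl_add, zero_add]
  induction K with
  | nil => simp
  | cons x T ih =>
      have hx := hK x (by simp)
      have hT : ∀ k ∈ T, 0 ≤ k.1 ∧ k.1 < 40 := fun k hk => hK k (by simp [hk])
      have hmap : (PySem.List.pyRange 0 40 1).map
            (fun r => ((x :: T).count (r, pk r) : Int))
          = (PySem.List.pyRange 0 40 1).map
            (fun r => (T.count (r, pk r) : Int)
              + (if (r, pk r) == x then (1 : Int) else 0)) := by
        apply List.map_congr_left
        intro r _
        rw [List.count_cons]
        push_cast
        rw [Bool.beq_comm]
      rw [hmap, PySem.List.sum_map_add_int, ih hT,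
          PySem.List.sum_map_ite_one_zero (fun r => (r, pk r) == x)]
      rw [countP_range_pair pk x.1 x.2 hx.1 hx.2]
      rw [List.countP_cons]
      by_cases h : pk x.1 = x.2 <;> simp [h]

-- B's bucket-sum score equals A's per-index counter for each pattern
theorem bScore_eq (answers p : List Int) (hp : (p.length : Int) ∣ 40) (hl : 0 < p.length) :
    bScore (bHist answers) p
      = (PySem.List.enumerate answers).foldl
          (fun (s : Int) iv =>
            if iv.2 = PySem.List.pyGetD p (PySem.Int.mod iv.1 (p.length : Int)) 0 then s + 1 else s) 0 := by
  have hLpos : (0 : Int) < (p.length : Int) := by exact_mod_cast hl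
  have hA : (PySem.List.enumerate answers).foldl
        (fun (s : Int) iv =>
          if iv.2 = PySem.List.pyGetD p (PySem.Int.mod iv.1 (p.length : Int)) 0 then s + 1 else s) 0
      = (((PySem.List.enumerate answers).countP
            (fun iv => decide (iv.2 = PySem.List.pyGetD p (PySem.Int.mod iv.1 (p.length : Int)) 0))) : Int) := by
    simpa using PySem.List.foldl_count_if
      (fun iv : Int × Int => decide (iv.2 = PySem.List.pyGetD p (PySem.Int.mod iv.1 (p.length : Int)) 0))
      (PySem.List.enumerate answers) 0
  unfold bScore
  simp only [bHist_getD]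
  rw [sum_counts _ _ (by
    intro k hk
    obtain ⟨iv, _, rfl⟩ := List.mem_map.mp hk
    exact ⟨PySem.Int.mod_nonneg _ (by norm_num), PySem.Int.mod_lt _ (by norm_num)⟩)]
  rw [List.countP_map, hA]
  congr 1
  apply List.countP_congr
  intro iv _
  have hmm : PySem.Int.mod (PySem.Int.mod iv.1 40) (p.length : Int)
      = PySem.Int.mod iv.1 (p.length : Int) := by
    rw [PySem.Int.mod_eq_emod_of_pos (by norm_num : (0:Int) < 40),
        PySem.Int.mod_eq_emod_of_pos hLpos, PySem.Int.mod_eq_emod_of_pos hLpos]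
    exact Int.emod_emod_of_dvd _ hp
  simp only [Function.comp, hmm]
  simp only [beq_iff_eq, decide_eq_true_eq]
  exact eq_comm

-- A's one pass with a triple accumulator equals the triple of three per-pattern passes
theorem triple_fold (p1 p2 p3 : List Int) (l : List (Int × Int)) (a b c : Int) :
    l.foldl
      (fun (acc : Int × Int × Int) iv =>
        ((if iv.2 = PySem.List.pyGetD p1 (PySem.Int.mod iv.1 (p1.length : Int)) 0 then acc.1 + 1 else acc.1),
         (if iv.2 = PySem.List.pyGetD p2 (PySem.Int.mod iv.1 (p2.length : Int)) 0 then acc.2.1 + 1 else acc.2.1),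
         (if iv.2 = PySem.List.pyGetD p3 (PySem.Int.mod iv.1 (p3.length : Int)) 0 then acc.2.2 + 1 else acc.2.2)))
      (a, b, c)
    = (l.foldl (fun s iv => if iv.2 = PySem.List.pyGetD p1 (PySem.Int.mod iv.1 (p1.length : Int)) 0 then s + 1 else s) a,
       l.foldl (fun s iv => if iv.2 = PySem.List.pyGetD p2 (PySem.Int.mod iv.1 (p2.length : Int)) 0 then s + 1 else s) b,
       l.foldl (fun s iv => if iv.2 = PySem.List.pyGetD p3 (PySem.Int.mod iv.1 (p3.length : Int)) 0 then s + 1 else s) c) := by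
  induction l generalizing a b c with
  | nil => rfl
  | cons hd tl ih =>
      simp only [List.foldl_cons]
      exact ih _ _ _

-- winner selection: A's if-chain of appends over max(max s1 s2) s3 equals
-- B's comprehension over enumerate([s1,s2,s3]) with best = max([s1,s2,s3])
theorem winners (s1 s2 s3 : Int) :
    (if max (max s1 s2) s3 = s3 then
      (if max (max s1 s2) s3 = s2 then
        (if max (max s1 s2) s3 = s1 then ([] : List Int) ++ [1] else []) ++ [2]
       else (if max (max s1 s2) s3 = s1 then ([] : List Int) ++ [1] else [])) ++ [3]
     else
      (if max (max s1 s2) s3 = s2 then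
        (if max (max s1 s2) s3 = s1 then ([] : List Int) ++ [1] else []) ++ [2]
       else (if max (max s1 s2) s3 = s1 then ([] : List Int) ++ [1] else [])))
    = (PySem.List.enumerate [s1, s2, s3]).foldl
        (fun (acc : List Int) is =>
          if is.2 = (PySem.List.max? [s1, s2, s3] (fun x => x)).getD 0 then acc ++ [is.1 + 1] else acc) [] := by
  rw [PySem.List.max?_id_cons]
  simp only [PySem.List.enumerate_cons, PySem.List.enumerate_nil, List.foldl_cons, List.foldl_nil,
    Option.getD_some, List.nil_append]
  split_ifs <;> first | rfl | omega

-- ===== VERDICT (by name: the statement is the Claim_ definition above) =====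
theorem solution_spec : Claim_equal_solution := by
  intro answers _
  have h1 := bScore_eq answers [1, 2, 3, 4, 5] (by norm_num) (by norm_num)
  have h2 := bScore_eq answers [2, 1, 2, 3, 2, 4, 2, 5] (by norm_num) (by norm_num)
  have h3 := bScore_eq answers [3, 3, 1, 1, 2, 2, 4, 4, 5, 5] (by norm_num) (by norm_num)
  simp only [Spec_solution, solution, solution_alt, List.map_cons, List.map_nil,
    h1, h2, h3, triple_fold]
  exact winners _ _ _
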